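-- pv_equiv track=rewrite | github.com/cristianjoshmayo-create/biometric_auth | ml/train_keystroke_rf.py | get_active_trigraphs
-- ===== SOURCE A (Python) =====
-- def get_active_trigraphs(phrase: str) -> list:
--     """
--     Every unique [a-z]{3} window in the phrase. Each becomes a `trigraph_<tri>`
--     feature: press[i] → press[i+2] elapsed time, captures sequence muscle memory.
--     """
--     clean = phrase.lower().replace(" ", "")
--     seen, trigs = set(), []
--     for i in range(len(clean) - 2):
--         t = clean[i] + clean[i + 1] + clean[i + 2]
--         if t.isalpha() and t not in seen:
--             seen.add(t)
--             trigs.append(t)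
--     return trigs
-- ===== SOURCE B (Python) =====
-- def get_active_trigraphs(phrase: str) -> list:
--     clean = phrase.lower().replace(" ", "")
--     seen, trigs = set(), []
--     win = ()  # last (up to) two alphabetic characters; reset at any non-letter
--     for c in clean:
--         if c.isalpha():
--             if len(win) == 2:
--                 t = win[0] + win[1] + c
--                 if t not in seen:
--                     seen.add(t)
--                     trigs.append(t)
--                 win = (win[1], c)
--             else:
--                 win = win + (c,)
--         else:
--             win = ()
--     return trigs
-- ===== Notes on version B (the rewrite author's own statement) =====
-- stated objective: alternative
-- what changed: Replaces A's indexed loop over range(len-2) that slices a 3-char window and tests t.isalpha() per trigraph by a single streaming pass that tests isalpha per character and keeps a window of the last two alphabetic characters, reset on any non-letter, so non-letter characters never form candidate windows.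
import Mathlib
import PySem

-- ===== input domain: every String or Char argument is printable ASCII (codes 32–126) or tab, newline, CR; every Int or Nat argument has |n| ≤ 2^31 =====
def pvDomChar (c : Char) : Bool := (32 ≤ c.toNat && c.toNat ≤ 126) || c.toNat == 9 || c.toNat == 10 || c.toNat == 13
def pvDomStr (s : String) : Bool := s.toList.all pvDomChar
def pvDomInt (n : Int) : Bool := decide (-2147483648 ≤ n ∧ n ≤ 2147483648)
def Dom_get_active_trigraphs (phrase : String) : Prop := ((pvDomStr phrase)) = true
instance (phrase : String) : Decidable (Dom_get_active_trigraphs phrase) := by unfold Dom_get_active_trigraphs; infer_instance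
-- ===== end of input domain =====

-- B replaces A's index loop with per-trigraph isalpha tests by a single streaming pass that
-- keeps a window of the last two alphabetic characters (reset on any non-letter); objective: alternative.

-- ===== PORT A =====
-- literal port of A: clean = phrase.lower().replace(" ", ""); indexed loop over range(len-2),
-- t = clean[i]+clean[i+1]+clean[i+2] (indices always in range, so pyGetD is exact), dedup via a set
def get_active_trigraphs (phrase : String) : List String :=
  let clean := (PySem.Str.replace (PySem.Str.lower phrase) " " "").toList
  let res := (PySem.List.pyRange 0 ((clean.length : Int) - 2) 1).foldl
    (fun (st : PySem.Set String × List String) i =>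
      let t := String.ofList [PySem.List.pyGetD clean i ' ',
                          PySem.List.pyGetD clean (i + 1) ' ',
                          PySem.List.pyGetD clean (i + 2) ' ']
      if PySem.Str.strIsalpha t && !(PySem.Set.contains st.1 t)
      then (PySem.Set.add st.1 t, st.2 ++ [t])
      else st)
    (PySem.Set.empty, [])
  res.2

-- ===== PORT B =====
-- literal port of Source B: one pass over clean; win holds the last ≤2 alphabetic chars
-- (the `len(win) == 2` test is the [a, b] pattern), reset to () on a non-letter
def get_active_trigraphs_alt (phrase : String) : List String :=
  let clean := (PySem.Str.replace (PySem.Str.lower phrase) " " "").toList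
  let res := clean.foldl
    (fun (st : List Char × PySem.Set String × List String) c =>
      if PySem.Chars.isalpha c then
        match st.1 with
        | [a, b] =>
          let t := String.ofList [a, b, c]
          if !(PySem.Set.contains st.2.1 t)
          then ([b, c], PySem.Set.add st.2.1 t, st.2.2 ++ [t])
          else ([b, c], st.2)
        | w => (w ++ [c], st.2)
      else ([], st.2))
    ([], PySem.Set.empty, [])
  res.2.2

-- ===== PRECONDITION & SPEC =====
def Spec_get_active_trigraphs (phrase : String) (out : List String) : Prop := out = get_active_trigraphs_alt phrase
instance (phrase : String) (out : List String) : Decidable (Spec_get_active_trigraphs phrase out) := by unfold Spec_get_active_trigraphs; infer_instance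

-- ===== CLAIM (what is proved, stated in full; the proofs are below) =====
def Claim_equal_get_active_trigraphs : Prop := ∀ (phrase : String), Dom_get_active_trigraphs phrase → Spec_get_active_trigraphs phrase (get_active_trigraphs phrase)

-- ===== LEMMAS AND PROOFS =====

-- the list of all 3-char windows of l, in order
def pvWin : List Char → List (Char × Char × Char)
  | a :: b :: c :: rest => (a, b, c) :: pvWin (b :: c :: rest)
  | _ => []

-- the common per-window step both loops implement
def pvStep (st : PySem.Set String × List String) (w : Char × Char × Char) :
    PySem.Set String × List String :=
  let t := String.ofList [w.1, w.2.1, w.2.2]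
  if (PySem.Chars.isalpha w.1 && PySem.Chars.isalpha w.2.1 && PySem.Chars.isalpha w.2.2)
      && !(PySem.Set.contains st.1 t)
  then (PySem.Set.add st.1 t, st.2 ++ [t])
  else st

lemma pvStep_skip1 {c : Char} (h : PySem.Chars.isalpha c = false) (st : PySem.Set String × List String)
    (b d : Char) : pvStep st (c, b, d) = st := by
  simp [pvStep, h]

lemma pvStep_skip2 {c : Char} (h : PySem.Chars.isalpha c = false) (st : PySem.Set String × List String)
    (b d : Char) : pvStep st (b, c, d) = st := by
  simp [pvStep, h]

lemma pvStep_skip3 {c : Char} (h : PySem.Chars.isalpha c = false) (st : PySem.Set String × List String)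
    (b d : Char) : pvStep st (b, d, c) = st := by
  simp [pvStep, h]

lemma pvWin_skip1 {c : Char} (h : PySem.Chars.isalpha c = false)
    (l : List Char) (st : PySem.Set String × List String) :
    (pvWin (c :: l)).foldl pvStep st = (pvWin l).foldl pvStep st := by
  match l with
  | [] => rfl
  | [d] => rfl
  | d :: e :: rest => simp [pvWin, pvStep_skip1 h]

lemma pvWin_skip2 {c : Char} (h : PySem.Chars.isalpha c = false)
    (b : Char) (l : List Char) (st : PySem.Set String × List String) :
    (pvWin (b :: c :: l)).foldl pvStep st = (pvWin l).foldl pvStep st := by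
  match l with
  | [] => rfl
  | d :: rest => simp [pvWin, pvStep_skip2 h, pvWin_skip1 h]

lemma pvWin_skip3 {c : Char} (h : PySem.Chars.isalpha c = false)
    (a b : Char) (l : List Char) (st : PySem.Set String × List String) :
    (pvWin (a :: b :: c :: l)).foldl pvStep st = (pvWin l).foldl pvStep st := by
  simp [pvWin, pvStep_skip3 h, pvWin_skip2 h]

-- A's indexed loop (Nat form) computes the pvStep fold over all windows
lemma pvA_nat (l : List Char) :
    ∀ st : PySem.Set String × List String,
      (List.range (l.length - 2)).foldl
        (fun st k => pvStep st (l.getD k ' ', l.getD (k + 1) ' ', l.getD (k + 2) ' ')) st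
      = (pvWin l).foldl pvStep st := by
  induction l with
  | nil => intro st; rfl
  | cons a l' ih =>
    intro st
    match l' with
    | [] => rfl
    | [b] => rfl
    | b :: c :: rest =>
      have hlen : (a :: b :: c :: rest).length - 2 = (rest.length + 1) := by simp
      rw [hlen, List.range_succ_eq_map, List.foldl_cons, List.foldl_map]
      simp only [List.getD_cons_zero, List.getD_cons_succ]
      rw [show ((b :: c :: rest).length - 2) = rest.length by simp] at ih
      have := ih (pvStep st (a, b, c))
      simp only [List.getD_cons_succ] at this ⊢
      rw [pvWin]
      simpa using this

-- B's streaming loop computes the pvStep fold over the windows of (win ++ rest)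
lemma pvB_inv (l : List Char) :
    ∀ (w : List Char) (st : PySem.Set String × List String),
      w.length ≤ 2 → w.all PySem.Chars.isalpha = true →
      (l.foldl
        (fun (st : List Char × PySem.Set String × List String) c =>
          if PySem.Chars.isalpha c then
            match st.1 with
            | [a, b] =>
              let t := String.ofList [a, b, c]
              if !(PySem.Set.contains st.2.1 t)
              then ([b, c], PySem.Set.add st.2.1 t, st.2.2 ++ [t])
              else ([b, c], st.2)
            | w => (w ++ [c], st.2)
          else ([], st.2))
        (w, st)).2
      = (pvWin (w ++ l)).foldl pvStep st := by
  induction l with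
  | nil =>
    intro w st hlen _
    match w, hlen with
    | [], _ => rfl
    | [x], _ => rfl
    | [x, y], _ => rfl
  | cons c l' ih =>
    intro w st hlen halpha
    by_cases hc : PySem.Chars.isalpha c = true
    · match w, hlen, halpha with
      | [], _, _ =>
        rw [List.foldl_cons]
        simp only [hc, if_pos]
        exact ih [c] st (by simp) (by simp [hc])
      | [x], _, hx =>
        rw [List.foldl_cons]
        simp only [hc, if_pos]
        have hx' : PySem.Chars.isalpha x = true := by simpa using hx
        exact ih [x, c] st (by simp) (by simp [hc, hx'])
      | [x, y], _, hxy =>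
        have hx : PySem.Chars.isalpha x = true := by simp at hxy; exact hxy.1
        have hy : PySem.Chars.isalpha y = true := by simp at hxy; exact hxy.2
        rw [List.foldl_cons]
        simp only [hc, if_pos]
        have hsplit :
            (if (!(PySem.Set.contains st.1 (String.ofList [x, y, c]))) = true
             then (([y, c] : List Char), PySem.Set.add st.1 (String.ofList [x, y, c]),
                   st.2 ++ [String.ofList [x, y, c]])
             else (([y, c] : List Char), st))
            = (([y, c] : List Char), pvStep st (x, y, c)) := by
          simp only [pvStep, hx, hy, hc, Bool.and_self, Bool.true_and]
          split_ifs <;> rfl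
        rw [hsplit, ih [y, c] (pvStep st (x, y, c)) (by simp) (by simp [hy, hc])]
        simp [pvWin]
    · have hc' : PySem.Chars.isalpha c = false := by simpa using hc
      rw [List.foldl_cons]
      simp only [hc', Bool.false_eq_true, if_false]
      rw [ih [] st (by simp) (by simp)]
      match w, hlen with
      | [], _ => simp [pvWin_skip1 hc']
      | [x], _ => simp [pvWin_skip2 hc']
      | [x, y], _ => simp [pvWin_skip3 hc']

-- A's Int-range loop is the Nat-range loop of pvA_nat
lemma pvA_eq (l : List Char) (st : PySem.Set String × List String) :
    (PySem.List.pyRange 0 ((l.length : Int) - 2) 1).foldl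
      (fun st i =>
        let t := String.ofList [PySem.List.pyGetD l i ' ',
                            PySem.List.pyGetD l (i + 1) ' ',
                            PySem.List.pyGetD l (i + 2) ' ']
        if PySem.Str.strIsalpha t && !(PySem.Set.contains st.1 t)
        then (PySem.Set.add st.1 t, st.2 ++ [t])
        else st) st
    = (pvWin l).foldl pvStep st := by
  rw [PySem.List.pyRange_one, List.foldl_map,
      show (((l.length : Int) - 2 - 0).toNat) = l.length - 2 by omega]
  refine Eq.trans (PySem.List.foldl_congr_mem _ _
      (fun st k => pvStep st (l.getD k ' ', l.getD (k + 1) ' ', l.getD (k + 2) ' ')) _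
      ?_) (pvA_nat l st)
  (
        intro st k _
        have h1 : PySem.List.pyGetD l ((0 : Int) + (k : Int)) ' ' = l.getD k ' ' := by
          rw [show (0 : Int) + (k : Int) = ((k : Nat) : Int) by ring,
              PySem.List.pyGetD_natCast]
        have h2 : PySem.List.pyGetD l ((0 : Int) + (k : Int) + 1) ' ' = l.getD (k + 1) ' ' := by
          rw [show (0 : Int) + (k : Int) + 1 = ((k + 1 : Nat) : Int) by push_cast; ring,
              PySem.List.pyGetD_natCast]
        have h3 : PySem.List.pyGetD l ((0 : Int) + (k : Int) + 2) ' ' = l.getD (k + 2) ' ' := by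
          rw [show (0 : Int) + (k : Int) + 2 = ((k + 2 : Nat) : Int) by push_cast; ring,
              PySem.List.pyGetD_natCast]
        simp only [h1, h2, h3]
        simp [pvStep, PySem.Str.strIsalpha, PySem.Chars.strIsalpha, Bool.and_assoc])

-- ===== VERDICT (by name: the statement is the Claim_ definition above) =====
theorem get_active_trigraphs_spec : Claim_equal_get_active_trigraphs := by
  intro phrase _
  simp only [Spec_get_active_trigraphs, get_active_trigraphs, get_active_trigraphs_alt]
  rw [pvB_inv _ [] _ (by simp) (by simp), pvA_eq]
  simp
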